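-- pv_equiv track=rewrite | github.com/ma-labo/DeepSeer | ml_dev/utils/state_acquisition.py | find_similar_trace
-- ===== SOURCE A (Python) =====
-- def find_similar_trace(train_trace, test_trace, fuzz=False):
--     """
--     Find similar trace from training samples
--     :param train_trace: [[1,2,3,4], [4,5,6,7], ...]
--     :param test_trace: [2,3,4]
--     :param fuzz: whether to do accurate search or not
--     :return: [(training_idx, start_idx)]
--     """
--     result = []
--     if fuzz:
--         new_test_trace = [v for i, v in enumerate(test_trace) if i == 0 or v != test_trace[i-1]]
--         test_trace_len = len(new_test_trace)
--         for i in range(len(train_trace)):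
--             this_trace = train_trace[i]
--             this_new_train_trace = [v for j, v in enumerate(this_trace) if j == 0 or v != this_trace[j-1]]
--             idx = [j for j, v in enumerate(this_trace) if j == 0 or v != this_trace[j - 1]]
--             this_trace_len = len(this_new_train_trace)
--             if this_trace_len < test_trace_len:
--                 continue
--             for j in range(this_trace_len - test_trace_len):
--                 k = 0
--                 while k < test_trace_len and this_new_train_trace[j + k] == new_test_trace[k]:
--                     k += 1
--                 if k == test_trace_len:
--                     result.append((i, idx[j], idx[j + k] + 1))
--     else:
--         test_trace_len = len(test_trace)
--         for i in range(len(train_trace)):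
--             this_trace_len = len(train_trace[i])
--             if this_trace_len < test_trace_len:
--                 continue
--             for j in range(this_trace_len - test_trace_len):
--                 k = 0
--                 while k < test_trace_len and train_trace[i][j + k] == test_trace[k]:
--                     k += 1
--                 if k == test_trace_len:
--                     result.append((i, j))
--     return result
-- ===== SOURCE B (Python) =====
-- def find_similar_trace(train_trace, test_trace, fuzz=False):
--     def compress(tr):
--         # one pass: compressed values and the index where each run starts
--         comp, idx = [], []
--         for j, v in enumerate(tr):
--             if not comp or v != comp[-1]:
--                 comp.append(v)
--                 idx.append(j)
--         return comp, idx
--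
--     def starts(trace, pattern):
--         # Rabin-Karp-style search: a rolling window fingerprint (the window sum,
--         # updated in O(1) per shift) filters candidate positions; the full window
--         # comparison runs only on fingerprint hits.  Keeps A's exclusive bound
--         # (start positions p with p < len(trace) - len(pattern)).
--         m, n = len(pattern), len(trace)
--         if n <= m:
--             return []
--         target = sum(pattern)
--         s = sum(trace[:m])
--         out = []
--         for p in range(n - m):
--             if s == target and trace[p:p + m] == pattern:
--                 out.append(p)
--             s += trace[p + m] - trace[p]
--         return out
--
--     result = []
--     if fuzz:
--         pat, _ = compress(test_trace)
--         m = len(pat)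
--         for i, tr in enumerate(train_trace):
--             comp, idx = compress(tr)
--             result.extend((i, idx[p], idx[p + m] + 1) for p in starts(comp, pat))
--     else:
--         for i, tr in enumerate(train_trace):
--             result.extend((i, p) for p in starts(tr, test_trace))
--     return result
-- ===== Notes on version B (the rewrite author's own statement) =====
-- stated objective: alternative
-- what changed: Replaces A's per-position element-by-element rescans (the inner while-k loop at every offset) by a Rabin-Karp-style matcher: a rolling window fingerprint (window sum, updated in O(1) per shift) filters candidate positions and the full window comparison runs only on fingerprint hits; compression is a single pass building values and run-start indices together instead of A's three separate comprehensions.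
import Mathlib
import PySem

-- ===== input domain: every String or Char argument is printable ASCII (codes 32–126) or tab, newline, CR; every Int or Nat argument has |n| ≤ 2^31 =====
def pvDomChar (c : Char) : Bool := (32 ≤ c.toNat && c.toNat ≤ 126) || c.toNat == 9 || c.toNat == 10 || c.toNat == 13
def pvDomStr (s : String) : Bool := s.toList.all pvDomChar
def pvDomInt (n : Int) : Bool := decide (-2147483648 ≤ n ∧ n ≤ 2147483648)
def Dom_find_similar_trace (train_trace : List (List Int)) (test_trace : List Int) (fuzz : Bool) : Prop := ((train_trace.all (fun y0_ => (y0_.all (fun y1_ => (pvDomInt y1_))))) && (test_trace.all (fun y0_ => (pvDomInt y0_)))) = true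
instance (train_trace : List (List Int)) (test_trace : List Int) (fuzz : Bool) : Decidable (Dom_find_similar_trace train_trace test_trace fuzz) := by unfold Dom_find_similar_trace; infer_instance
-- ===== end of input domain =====

-- B replaces A's per-position element-by-element rescans by a Rabin–Karp-style matcher
-- (rolling window-sum fingerprint filters candidates, full comparison only on hits) and a
-- one-pass compression; return value only (objective: alternative).

-- ===== PORT A =====
-- [v for i, v in enumerate(t) if i == 0 or v != t[i-1]]   (index i-1 is in range whenever read)
def pyCompressVals (tr : List Int) : List Int :=
  (PySem.List.enumerate tr).filterMap (fun p =>
    if p.1 == 0 || !(p.2 == PySem.List.pyGetD tr (p.1 - 1) 0) then some p.2 else none)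

-- [j for j, v in enumerate(t) if j == 0 or v != t[j-1]]
def pyCompressIdx (tr : List Int) : List Int :=
  (PySem.List.enumerate tr).filterMap (fun p =>
    if p.1 == 0 || !(p.2 == PySem.List.pyGetD tr (p.1 - 1) 0) then some p.1 else none)

-- k = 0; while k < m and a[j+k] == b[k]: k += 1   (indices in range whenever read;
-- the fuel (m-k).toNat is exactly the remaining iteration bound: 'k < m' holds iff fuel > 0)
def pyWhileKAux (a b : List Int) (j : Int) : Nat → Int → Int
  | 0, k => k
  | fuel + 1, k =>
    if PySem.List.pyGetD a (j + k) 0 = PySem.List.pyGetD b k 0 then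
      pyWhileKAux a b j fuel (k + 1)
    else k

def pyWhileK (a b : List Int) (m j k : Int) : Int := pyWhileKAux a b j (m - k).toNat k

def find_similar_trace (train_trace : List (List Int)) (test_trace : List Int) (fuzz : Bool) : List (List Int) :=
  if fuzz then
    let new_test := pyCompressVals test_trace
    let m : Int := new_test.length
    (PySem.List.pyRange 0 train_trace.length 1).foldl (fun result i =>
      let this_trace := PySem.List.pyGetD train_trace i []
      let comp := pyCompressVals this_trace
      let idx := pyCompressIdx this_trace
      let n : Int := comp.length
      if n < m then result
      else (PySem.List.pyRange 0 (n - m) 1).foldl (fun result j =>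
        let k := pyWhileK comp new_test m j 0
        if k == m then
          result ++ [[i, PySem.List.pyGetD idx j 0, PySem.List.pyGetD idx (j + k) 0 + 1]]
        else result) result) []
  else
    let m : Int := test_trace.length
    (PySem.List.pyRange 0 train_trace.length 1).foldl (fun result i =>
      let this_trace := PySem.List.pyGetD train_trace i []
      let n : Int := this_trace.length
      if n < m then result
      else (PySem.List.pyRange 0 (n - m) 1).foldl (fun result j =>
        let k := pyWhileK this_trace test_trace m j 0
        if k == m then result ++ [[i, j]] else result) result) []

-- ===== PORT B =====
-- one pass: (compressed values, run-start indices)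
def bCompress (tr : List Int) : List Int × List Int :=
  (PySem.List.enumerate tr).foldl (fun ci p =>
    if ci.1 == ([] : List Int) || !(p.2 == PySem.List.pyGetD ci.1 (-1) 0) then
      (ci.1 ++ [p.2], ci.2 ++ [p.1])
    else ci) ([], [])

-- Rabin–Karp-style: rolling window-sum fingerprint, full compare only on fingerprint hits;
-- state of the loop is the pair (running fingerprint s, collected out)
def bStarts (trace pattern : List Int) : List Int :=
  let m : Int := pattern.length
  let n : Int := trace.length
  if n ≤ m then []
  else
    let target : Int := pattern.sum
    let s0 : Int := (PySem.List.slice trace none (some m)).sum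
    ((PySem.List.pyRange 0 (n - m) 1).foldl
      (fun (acc : Int × List Int) p =>
        (acc.1 + (PySem.List.pyGetD trace (p + m) 0 - PySem.List.pyGetD trace p 0),
         if acc.1 == target && (PySem.List.slice trace (some p) (some (p + m)) == pattern)
         then acc.2 ++ [p] else acc.2))
      (s0, ([] : List Int))).2

def find_similar_trace_alt (train_trace : List (List Int)) (test_trace : List Int) (fuzz : Bool) : List (List Int) :=
  if fuzz then
    let pat := (bCompress test_trace).1
    let m : Int := pat.length
    (PySem.List.enumerate train_trace).foldl (fun result p =>
      let ci := bCompress p.2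
      result ++ (bStarts ci.1 pat).map (fun q =>
        [p.1, PySem.List.pyGetD ci.2 q 0, PySem.List.pyGetD ci.2 (q + m) 0 + 1])) []
  else
    (PySem.List.enumerate train_trace).foldl (fun result p =>
      result ++ (bStarts p.2 test_trace).map (fun q => [p.1, q])) []

-- ===== PRECONDITION & SPEC =====
def Spec_find_similar_trace (train_trace : List (List Int)) (test_trace : List Int) (fuzz : Bool) (out : List (List Int)) : Prop := out = find_similar_trace_alt train_trace test_trace fuzz
instance (train_trace : List (List Int)) (test_trace : List Int) (fuzz : Bool) (out : List (List Int)) : Decidable (Spec_find_similar_trace train_trace test_trace fuzz out) := by unfold Spec_find_similar_trace; infer_instance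

-- ===== CLAIM (what is proved, stated in full; the proofs are below) =====
def Claim_equal_find_similar_trace : Prop := ∀ (train_trace : List (List Int)) (test_trace : List Int) (fuzz : Bool), Dom_find_similar_trace train_trace test_trace fuzz → Spec_find_similar_trace train_trace test_trace fuzz (find_similar_trace train_trace test_trace fuzz)

-- ===== LEMMAS AND PROOFS =====
-- common structural spec of the duplicate compression: (run-start index, value) pairs
def cRun (prev : Int) (s : Int) : List Int → List (Int × Int)
  | [] => []
  | x :: xs => if x = prev then cRun x (s + 1) xs else (s, x) :: cRun x (s + 1) xs

def cSpec : List Int → List (Int × Int)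
  | [] => []
  | x :: xs => (0, x) :: cRun x 1 xs

theorem pyGetD_append_last (pre l : List Int) (h : pre ≠ []) :
    PySem.List.pyGetD (pre ++ l) ((pre.length : Int) - 1) 0 = pre.getLast h := by
  have h1 : 1 ≤ pre.length := List.length_pos_of_ne_nil h
  rw [show ((pre.length : Int) - 1) = ((pre.length - 1 : Nat) : Int) by omega,
    PySem.List.pyGetD_natCast, List.getD_eq_getElem?_getD,
    List.getLast_eq_getElem, List.getElem?_append_left (by omega),
    List.getElem?_eq_getElem (by omega)]
  rfl

theorem cRun_A_gen {β : Type} (g : Int × Int → β) :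
    ∀ (suf pre : List Int) (h : pre ≠ []),
    (PySem.List.enumerate suf (pre.length : Int)).filterMap
      (fun p => if p.1 == 0 || !(p.2 == PySem.List.pyGetD (pre ++ suf) (p.1 - 1) 0)
                then some (g p) else none)
    = (cRun (pre.getLast h) (pre.length : Int) suf).map g := by
  intro suf
  induction suf with
  | nil => intro pre h; simp [PySem.List.enumerate_nil, cRun]
  | cons x rest ih =>
    intro pre h
    rw [PySem.List.enumerate_cons]
    have h1 : 1 ≤ pre.length := List.length_pos_of_ne_nil h
    have hz : (((pre.length : Int)) == 0) = false := beq_eq_false_iff_ne.mpr (by omega)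
    have hlast : PySem.List.pyGetD (pre ++ x :: rest) ((pre.length : Int) - 1) 0 = pre.getLast h :=
      pyGetD_append_last pre (x :: rest) h
    have hassoc : pre ++ x :: rest = (pre ++ [x]) ++ rest := by simp
    have hlen : (pre.length : Int) + 1 = (((pre ++ [x]).length : Nat) : Int) := by simp
    have ihx := ih (pre ++ [x]) (by simp)
    rw [List.getLast_append_of_ne_nil _ (by simp)] at ihx
    simp only [List.getLast_singleton] at ihx
    by_cases hx : x = pre.getLast h
    · have hcond : ((((pre.length : Int)) == 0)
          || !(x == PySem.List.pyGetD (pre ++ x :: rest) ((pre.length : Int) - 1) 0)) = false := by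
        rw [hz, hlast, Bool.false_or, hx]; simp
      rw [List.filterMap_cons_none (by simp only [hcond]; rfl), cRun, if_pos hx,
        hassoc, hlen, ihx]
    · have hcond : ((((pre.length : Int)) == 0)
          || !(x == PySem.List.pyGetD (pre ++ x :: rest) ((pre.length : Int) - 1) 0)) = true := by
        rw [hz, hlast, Bool.false_or]; simp [hx]
      rw [List.filterMap_cons_some (b := g ((pre.length : Int), x))
        (by simp only [hcond]; rfl), cRun, if_neg hx,
        List.map_cons, hassoc, hlen, ihx]

theorem pyCompressVals_eq (tr : List Int) : pyCompressVals tr = (cSpec tr).map (·.2) := by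
  cases tr with
  | nil => simp [pyCompressVals, cSpec, PySem.List.enumerate_nil]
  | cons x xs =>
    rw [pyCompressVals, PySem.List.enumerate_cons,
      List.filterMap_cons_some (b := x) (by simp), cSpec, List.map_cons]
    have h0 := cRun_A_gen (fun p => p.2) xs [x] (by simp)
    simp only [List.getLast_singleton, List.length_cons, List.length_nil,
      List.singleton_append] at h0
    simpa using congrArg (List.cons x) h0

theorem pyCompressIdx_eq (tr : List Int) : pyCompressIdx tr = (cSpec tr).map (·.1) := by
  cases tr with
  | nil => simp [pyCompressIdx, cSpec, PySem.List.enumerate_nil]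
  | cons x xs =>
    rw [pyCompressIdx, PySem.List.enumerate_cons,
      List.filterMap_cons_some (b := (0:Int)) (by simp), cSpec, List.map_cons]
    have h0 := cRun_A_gen (fun p => p.1) xs [x] (by simp)
    simp only [List.getLast_singleton, List.length_cons, List.length_nil,
      List.singleton_append] at h0
    simpa using congrArg (List.cons (0:Int)) h0

theorem bCompress_gen :
    ∀ (suf : List Int) (c d : List Int) (h : c ≠ []) (s : Int),
    (PySem.List.enumerate suf s).foldl (fun ci p =>
      if ci.1 == ([] : List Int) || !(p.2 == PySem.List.pyGetD ci.1 (-1) 0) then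
        (ci.1 ++ [p.2], ci.2 ++ [p.1])
      else ci) (c, d)
    = (c ++ (cRun (c.getLast h) s suf).map (·.2), d ++ (cRun (c.getLast h) s suf).map (·.1)) := by
  intro suf
  induction suf with
  | nil => intro c d h s; simp [PySem.List.enumerate_nil, cRun]
  | cons x rest ih =>
    intro c d h s
    rw [PySem.List.enumerate_cons, List.foldl_cons]
    have hc : (c == ([] : List Int)) = false := beq_eq_false_iff_ne.mpr h
    have hlast : PySem.List.pyGetD c (-1) 0 = c.getLast h := PySem.List.pyGetD_neg_one c 0 h
    by_cases hx : x = c.getLast h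
    · have hcond : ((c == ([] : List Int)) || !(x == PySem.List.pyGetD c (-1) 0)) = false := by
        rw [hc, hlast, Bool.false_or, hx]; simp
      rw [if_neg (by simp only [hcond]; simp), cRun, if_pos hx, ih c d h (s + 1), hx]
    · have hcond : ((c == ([] : List Int)) || !(x == PySem.List.pyGetD c (-1) 0)) = true := by
        rw [hc, hlast, Bool.false_or]; simp [hx]
      rw [if_pos (by simp only [hcond]),
        ih (c ++ [x]) (d ++ [s]) (by simp) (s + 1), cRun, if_neg hx,
        List.getLast_append_of_ne_nil _ (by simp)]
      simp

theorem bCompress_eq (tr : List Int) :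
    bCompress tr = ((cSpec tr).map (·.2), (cSpec tr).map (·.1)) := by
  cases tr with
  | nil => simp [bCompress, cSpec, PySem.List.enumerate_nil]
  | cons x xs =>
    rw [bCompress, PySem.List.enumerate_cons, List.foldl_cons, if_pos (by simp), cSpec]
    have := bCompress_gen xs ([] ++ [x]) ([] ++ [(0:Int)]) (by simp) 1
    rw [List.getLast_append_of_ne_nil _ (by simp)] at this
    simp only [List.getLast_singleton, List.nil_append] at this
    simpa using this

theorem pyWhileKAux_eq_iff (a b : List Int) (jn : Nat) :
    ∀ (f kn : Nat), f = b.length - kn → kn ≤ b.length → jn + b.length ≤ a.length →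
    (pyWhileKAux a b (jn : Int) f (kn : Int) = (b.length : Int)
      ↔ (a.drop (jn + kn)).take (b.length - kn) = b.drop kn) := by
  intro f
  induction f with
  | zero =>
    intro kn hf hk hj
    have hkn : kn = b.length := by omega
    subst hkn
    rw [pyWhileKAux]
    simp [List.drop_length]
  | succ f ih =>
    intro kn hf hk hj
    have hklt : kn < b.length := by omega
    have hka : jn + kn < a.length := by omega
    rw [pyWhileKAux]
    rw [show (jn : Int) + (kn : Int) = ((jn + kn : Nat) : Int) by push_cast; ring]
    rw [PySem.List.pyGetD_natCast, PySem.List.pyGetD_natCast,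
      List.getD_eq_getElem a 0 hka, List.getD_eq_getElem b 0 hklt]
    rw [List.drop_eq_getElem_cons hka, List.drop_eq_getElem_cons hklt,
      show b.length - kn = (b.length - (kn + 1)) + 1 by omega, List.take_succ_cons]
    by_cases heq : a[jn + kn] = b[kn]
    · rw [if_pos heq]
      rw [show (kn : Int) + 1 = ((kn + 1 : Nat) : Int) by push_cast; ring]
      rw [ih (kn + 1) (by omega) (by omega) hj,
        show jn + (kn + 1) = jn + kn + 1 by omega, heq]
      simp only [List.cons.injEq, true_and]
    · rw [if_neg heq]
      constructor
      · intro hc; exfalso; omega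
      · intro hc; exact absurd (List.cons.injEq .. ▸ hc).1 heq

theorem whileK_beq (a b : List Int) (j : Int) (hj0 : 0 ≤ j)
    (hjm : j.toNat + b.length ≤ a.length) :
    (pyWhileK a b (b.length : Int) j 0 == (b.length : Int))
      = (PySem.List.slice a (some j) (some (j + (b.length : Int))) == b) := by
  rw [Bool.eq_iff_iff]
  simp only [beq_iff_eq]
  rw [show j = ((j.toNat : Nat) : Int) by omega, PySem.List.slice_natCast_add]
  rw [pyWhileK]
  rw [show (((b.length : Int)) - 0).toNat = b.length - 0 by omega]
  rw [show (0 : Int) = ((0 : Nat) : Int) by simp]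
  exact pyWhileKAux_eq_iff a b j.toNat (b.length - 0) 0 rfl (by omega) hjm

-- the window of B's rolling fingerprint
def bWin (tr : List Int) (m p : Nat) : List Int := (tr.drop p).take m

theorem bWin_slice (tr : List Int) (m p : Nat) :
    PySem.List.slice tr (some (p : Int)) (some ((p : Int) + (m : Int))) = bWin tr m p := by
  rw [PySem.List.slice_natCast_add]; rfl

-- rolling update: sum of window p plus (tr[p+m] - tr[p]) is the sum of window p+1
theorem bRollSum (tr : List Int) (m p : Nat) (h : p + m < tr.length) :
    (bWin tr m p).sum + (PySem.List.pyGetD tr ((p : Int) + (m : Int)) 0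
      - PySem.List.pyGetD tr (p : Int) 0) = (bWin tr m (p + 1)).sum := by
  have hp : p < tr.length := by omega
  rw [show ((p : Int) + (m : Int)) = ((p + m : Nat) : Int) by push_cast; ring,
    PySem.List.pyGetD_natCast, PySem.List.pyGetD_natCast,
    List.getD_eq_getElem tr 0 h, List.getD_eq_getElem tr 0 hp]
  cases m with
  | zero => simp [bWin]
  | succ k =>
    have hdrop : tr.drop p = tr[p] :: tr.drop (p + 1) := List.drop_eq_getElem_cons hp
    have hlen : k < (tr.drop (p + 1)).length := by
      rw [List.length_drop]; omega
    have hsucc : bWin tr (k + 1) (p + 1)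
        = bWin tr k (p + 1) ++ [(tr.drop (p + 1))[k]] := by
      rw [bWin, List.take_succ, List.getElem?_eq_getElem hlen]; rfl
    have hget : (tr.drop (p + 1))[k] = tr[p + k + 1] := by
      rw [List.getElem_drop]
      congr 1; omega
    rw [bWin, hdrop, List.take_succ_cons, hsucc, hget, List.sum_cons, List.sum_append]
    have hix : tr[p + (k + 1)]'h = tr[p + k + 1]'(by omega) := rfl
    rw [hix]
    simp only [bWin, List.sum_cons, List.sum_nil]
    ring

-- the fingerprint test is redundant exactly when the full comparison succeeds
theorem bCond_eq (w pat : List Int) :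
    ((w.sum == pat.sum) && (w == pat)) = (w == pat) := by
  by_cases h : w = pat
  · subst h; simp
  · simp [h]

-- loop invariant of B's scan: state is (sum of current window, collected matches)
theorem bRoll (tr pat : List Int) :
    ∀ (fuel p : Nat), p + fuel = tr.length - pat.length → p + pat.length ≤ tr.length →
    ∀ (out0 : List Int),
    (PySem.List.pyRange (p : Int) ((tr.length : Int) - (pat.length : Int)) 1).foldl
      (fun (acc : Int × List Int) q =>
        (acc.1 + (PySem.List.pyGetD tr (q + (pat.length : Int)) 0 - PySem.List.pyGetD tr q 0),
         if acc.1 == pat.sum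
            && (PySem.List.slice tr (some q) (some (q + (pat.length : Int))) == pat)
         then acc.2 ++ [q] else acc.2))
      ((bWin tr pat.length p).sum, out0)
    = ((bWin tr pat.length (tr.length - pat.length)).sum,
       out0 ++ (PySem.List.pyRange (p : Int) ((tr.length : Int) - (pat.length : Int)) 1).filter
         (fun q => PySem.List.slice tr (some q) (some (q + (pat.length : Int))) == pat)) := by
  intro fuel
  induction fuel with
  | zero =>
    intro p hf hle out0
    have hp : p = tr.length - pat.length := by omega
    have hcast : ((tr.length : Int) - (pat.length : Int)) ≤ (p : Int) := by omega
    rw [PySem.List.pyRange_one_eq_nil hcast]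
    simp [hp]
  | succ fuel ih =>
    intro p hf hle out0
    have hlt : (p : Int) < (tr.length : Int) - (pat.length : Int) := by omega
    rw [PySem.List.pyRange_one_cons hlt, List.foldl_cons, List.filter_cons]
    dsimp only
    rw [bWin_slice, bCond_eq]
    have hroll := bRollSum tr pat.length p (by omega)
    have hcast1 : ((p : Int) + 1) = (((p + 1 : Nat)) : Int) := by push_cast; ring
    by_cases hm : (bWin tr pat.length p == pat) = true
    · rw [if_pos hm, if_pos hm, hroll, hcast1,
        ih (p + 1) (by omega) (by omega) (out0 ++ [(p : Int)])]
      simp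
    · rw [if_neg hm, if_neg hm, hroll, hcast1, ih (p + 1) (by omega) (by omega) out0]

-- B's matcher computes exactly the slice-equality filter over A's (exclusive) start range
theorem bStarts_eq (trace pattern : List Int) :
    bStarts trace pattern
      = (PySem.List.pyRange 0 (max ((trace.length : Int) - pattern.length) 0) 1).filter
          (fun p => PySem.List.slice trace (some p) (some (p + (pattern.length : Int)))
            == pattern) := by
  rw [bStarts]
  by_cases h : (trace.length : Int) ≤ (pattern.length : Int)
  · rw [if_pos h, PySem.List.pyRange_one_eq_nil (by omega), List.filter_nil]
  · rw [if_neg h]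
    dsimp only
    have hmn : pattern.length < trace.length := by omega
    have hmax : max ((trace.length : Int) - pattern.length) 0
        = (trace.length : Int) - pattern.length := by omega
    have hs0 : (PySem.List.slice trace none (some (pattern.length : Int))).sum
        = (bWin trace pattern.length 0).sum := by
      rw [PySem.List.slice_to_natCast, bWin, List.drop_zero]
    have h0 := bRoll trace pattern (trace.length - pattern.length) 0 (by omega) (by omega) []
    simp only [Nat.cast_zero] at h0
    rw [hmax, hs0, h0]
    simp

theorem find_similar_trace_main : ∀ (train_trace : List (List Int)) (test_trace : List Int) (fuzz : Bool),
    find_similar_trace train_trace test_trace fuzz = find_similar_trace_alt train_trace test_trace fuzz := by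
  intro train_trace test_trace fuzz
  cases fuzz with
  | false =>
    simp only [find_similar_trace, find_similar_trace_alt, Bool.false_eq_true, if_false]
    rw [PySem.List.enumerate_eq_map_pyRange train_trace ([] : List Int), List.foldl_map]
    simp only [PySem.List.len]
    apply PySem.List.foldl_congr_mem
    intro acc i hi
    rw [bStarts_eq]
    by_cases hnm : ((PySem.List.pyGetD train_trace i ([] : List Int)).length : Int)
        < (test_trace.length : Int)
    · rw [if_pos hnm,
        show max (((PySem.List.pyGetD train_trace i ([] : List Int)).length : Int)
          - (test_trace.length : Int)) 0 = 0 by omega,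
        PySem.List.pyRange_one_eq_nil le_rfl]
      simp
    · rw [if_neg hnm,
        PySem.List.foldl_append_if
          (fun j => pyWhileK (PySem.List.pyGetD train_trace i ([] : List Int)) test_trace
            (test_trace.length : Int) j 0 == (test_trace.length : Int))
          (fun j => [i, j]),
        show max (((PySem.List.pyGetD train_trace i ([] : List Int)).length : Int)
          - (test_trace.length : Int)) 0
          = ((PySem.List.pyGetD train_trace i ([] : List Int)).length : Int)
            - (test_trace.length : Int) by omega]
      rw [List.filter_congr (fun j hj => by
        obtain ⟨hj0, hjlt⟩ := PySem.List.mem_pyRange_one.mp hj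
        exact whileK_beq (PySem.List.pyGetD train_trace i ([] : List Int)) test_trace j hj0
          (by omega))]
  | true =>
    simp only [find_similar_trace, find_similar_trace_alt, if_true]
    simp only [bCompress_eq, pyCompressVals_eq, pyCompressIdx_eq]
    rw [PySem.List.enumerate_eq_map_pyRange train_trace ([] : List Int), List.foldl_map]
    simp only [PySem.List.len]
    apply PySem.List.foldl_congr_mem
    intro acc i hi
    dsimp only
    rw [bStarts_eq]
    by_cases hnm : (((cSpec (PySem.List.pyGetD train_trace i ([] : List Int))).map
          (fun x => x.2)).length : Int)
        < (((cSpec test_trace).map (fun x => x.2)).length : Int)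
    · rw [if_pos hnm,
        show max ((((cSpec (PySem.List.pyGetD train_trace i ([] : List Int))).map
            (fun x => x.2)).length : Int)
          - (((cSpec test_trace).map (fun x => x.2)).length : Int)) 0 = 0 by omega,
        PySem.List.pyRange_one_eq_nil le_rfl]
      simp
    · rw [if_neg hnm,
        PySem.List.foldl_append_if
          (fun j => pyWhileK ((cSpec (PySem.List.pyGetD train_trace i ([] : List Int))).map
              (fun x => x.2)) ((cSpec test_trace).map (fun x => x.2))
              ((((cSpec test_trace).map (fun x => x.2)).length : Nat) : Int) j 0
            == ((((cSpec test_trace).map (fun x => x.2)).length : Nat) : Int))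
          (fun j => [i,
            PySem.List.pyGetD ((cSpec (PySem.List.pyGetD train_trace i ([] : List Int))).map
              (fun x => x.1)) j 0,
            PySem.List.pyGetD ((cSpec (PySem.List.pyGetD train_trace i ([] : List Int))).map
              (fun x => x.1))
              (j + pyWhileK ((cSpec (PySem.List.pyGetD train_trace i ([] : List Int))).map
                (fun x => x.2)) ((cSpec test_trace).map (fun x => x.2))
                ((((cSpec test_trace).map (fun x => x.2)).length : Nat) : Int) j 0) 0 + 1]),
        show max ((((cSpec (PySem.List.pyGetD train_trace i ([] : List Int))).map
            (fun x => x.2)).length : Int)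
          - (((cSpec test_trace).map (fun x => x.2)).length : Int)) 0
          = (((cSpec (PySem.List.pyGetD train_trace i ([] : List Int))).map
            (fun x => x.2)).length : Int)
            - (((cSpec test_trace).map (fun x => x.2)).length : Int) by omega]
      rw [List.filter_congr (fun j hj => by
        obtain ⟨hj0, hjlt⟩ := PySem.List.mem_pyRange_one.mp hj
        exact whileK_beq ((cSpec (PySem.List.pyGetD train_trace i ([] : List Int))).map
          (fun x => x.2)) ((cSpec test_trace).map (fun x => x.2)) j hj0 (by omega))]
      congr 1
      apply List.map_congr_left
      intro j hj
      obtain ⟨hjr, hq⟩ := List.mem_filter.mp hj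
      obtain ⟨hj0, hjlt⟩ := PySem.List.mem_pyRange_one.mp hjr
      have hp : pyWhileK ((cSpec (PySem.List.pyGetD train_trace i ([] : List Int))).map
          (fun x => x.2)) ((cSpec test_trace).map (fun x => x.2))
          ((((cSpec test_trace).map (fun x => x.2)).length : Nat) : Int) j 0
          = ((((cSpec test_trace).map (fun x => x.2)).length : Nat) : Int) := by
        have hb := whileK_beq ((cSpec (PySem.List.pyGetD train_trace i ([] : List Int))).map
          (fun x => x.2)) ((cSpec test_trace).map (fun x => x.2)) j hj0 (by omega)
        exact beq_iff_eq.mp (hb.trans hq)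
      rw [hp]

-- ===== VERDICT (by name: the statement is the Claim_ definition above) =====
theorem find_similar_trace_spec : Claim_equal_find_similar_trace := by
  intro tt te fz _
  exact find_similar_trace_main tt te fz
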